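-- pv_equiv track=rewrite | github.com/Dheebz/advent-of-code | src/python/year_2019/solution_2019_day_17.py | alignment_parameters
-- ===== SOURCE A (Python) =====
-- from typing import TYPE_CHECKING, Dict, List, Tuple
--
-- Point = Tuple[int, int]
--
-- def alignment_parameters(grid: Dict[Point, str]) -> int:
--     """Sum alignment parameters for scaffold intersections.
--
--     Args:
--         grid (Dict[Point, str]): Map of the scaffold layout.
--
--     Returns:
--         int: Total alignment parameter.
--     """
--     total = 0
--     for (x, y), char in grid.items():
--         if char != "#":
--             continue
--         neighbors = [
--             grid.get((x + 1, y)),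
--             grid.get((x - 1, y)),
--             grid.get((x, y + 1)),
--             grid.get((x, y - 1)),
--         ]
--         if all(n == "#" for n in neighbors):
--             total += x * y
--     return total
-- ===== SOURCE B (Python) =====
-- from typing import Dict, Tuple
--
-- Point = Tuple[int, int]
--
-- def alignment_parameters(grid: Dict[Point, str]) -> int:
--     """Sum alignment parameters by scattering a neighbor-degree table.
--
--     First pass: every scaffold cell increments a count at each of its four
--     orthogonal neighbors.  Second pass: a scaffold cell whose count is 4 is an
--     intersection; add x * y for each.
--     """
--     counts: Dict[Point, int] = {}
--     for (x, y), char in grid.items():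
--         if char != "#":
--             continue
--         for q in ((x + 1, y), (x - 1, y), (x, y + 1), (x, y - 1)):
--             counts[q] = counts.get(q, 0) + 1
--     return sum(x * y for (x, y), char in grid.items()
--                if char == "#" and counts.get((x, y), 0) == 4)
-- ===== Notes on version B (the rewrite author's own statement) =====
-- stated objective: alternative
-- what changed: Instead of pulling and testing the four neighbor lookups at every scaffold cell, B first scatters from each scaffold cell into a neighbor-degree table (count[q] = number of scaffold neighbors of q) and then sums x*y over scaffold cells whose degree is 4.
import Mathlib
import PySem

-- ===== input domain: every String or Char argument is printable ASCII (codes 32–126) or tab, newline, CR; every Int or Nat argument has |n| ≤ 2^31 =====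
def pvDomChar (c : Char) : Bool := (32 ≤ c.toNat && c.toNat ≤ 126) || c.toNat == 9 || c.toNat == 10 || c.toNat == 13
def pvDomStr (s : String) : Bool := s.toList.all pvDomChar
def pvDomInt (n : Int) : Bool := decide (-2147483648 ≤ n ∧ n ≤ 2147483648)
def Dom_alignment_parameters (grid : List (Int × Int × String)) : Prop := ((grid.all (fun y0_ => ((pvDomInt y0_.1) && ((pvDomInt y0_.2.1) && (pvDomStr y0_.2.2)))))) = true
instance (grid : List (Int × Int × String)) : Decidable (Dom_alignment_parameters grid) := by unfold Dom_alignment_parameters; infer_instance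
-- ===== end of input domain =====

-- B replaces A's per-cell pull of four neighbor lookups by a scatter pass that builds a
-- neighbor-degree table and then sums x*y over scaffold cells of degree 4 (objective: alternative).

-- ===== PORT A =====
-- the dict argument, decoded as an insertion-ordered PySem.Dict (duplicate coordinates overwrite, as dict building does)
def pvGrid (grid : List (Int × Int × String)) : PySem.Dict (Int × Int) String :=
  PySem.Dict.ofList (grid.map (fun e => ((e.1, e.2.1), e.2.2)))

def alignment_parameters (grid : List (Int × Int × String)) : Int :=
  let g := pvGrid grid
  g.items.foldl (fun total it =>
    if it.2 ≠ "#" then total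
    else
      let neighbors := [g.get? (it.1.1 + 1, it.1.2), g.get? (it.1.1 - 1, it.1.2),
                        g.get? (it.1.1, it.1.2 + 1), g.get? (it.1.1, it.1.2 - 1)]
      if neighbors.all (fun n => n == some "#") then total + it.1.1 * it.1.2 else total) 0

-- ===== PORT B =====
def pvNbrs (p : Int × Int) : List (Int × Int) :=
  [(p.1 + 1, p.2), (p.1 - 1, p.2), (p.1, p.2 + 1), (p.1, p.2 - 1)]

def alignment_parameters_alt (grid : List (Int × Int × String)) : Int :=
  let g := pvGrid grid
  let counts := g.items.foldl (fun d it =>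
    if it.2 ≠ "#" then d
    else (pvNbrs it.1).foldl (fun d q => d.insert q (d.getD q 0 + 1)) d)
    (PySem.Dict.empty : PySem.Dict (Int × Int) Int)
  g.items.foldl (fun total it =>
    if it.2 == "#" && counts.getD it.1 0 == 4 then total + it.1.1 * it.1.2 else total) 0

-- ===== PRECONDITION & SPEC =====
def Spec_alignment_parameters (grid : List (Int × Int × String)) (out : Int) : Prop := out = alignment_parameters_alt grid
instance (grid : List (Int × Int × String)) (out : Int) : Decidable (Spec_alignment_parameters grid out) := by unfold Spec_alignment_parameters; infer_instance

-- ===== CLAIM (what is proved, stated in full; the proofs are below) =====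
def Claim_equal_alignment_parameters : Prop := ∀ (grid : List (Int × Int × String)), Dom_alignment_parameters grid → Spec_alignment_parameters grid (alignment_parameters grid)

-- ===== LEMMAS AND PROOFS =====

-- the four orthogonal neighbors are pairwise distinct
lemma pvNbrs_nodup (p : Int × Int) : (pvNbrs p).Nodup := by
  simp [pvNbrs, Prod.ext_iff]
  omega

-- neighborhood is symmetric
lemma pvNbrs_mem_comm (p q : Int × Int) : q ∈ pvNbrs p ↔ p ∈ pvNbrs q := by
  simp [pvNbrs, Prod.ext_iff]
  omega

-- the scatter loop builds the neighbor-degree table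
lemma scatter_getD (l : List ((Int × Int) × String)) (d : PySem.Dict (Int × Int) Int) (q : Int × Int) :
    (l.foldl (fun d it =>
      if it.2 ≠ "#" then d
      else (pvNbrs it.1).foldl (fun d q => d.insert q (d.getD q 0 + 1)) d) d).getD q 0
    = d.getD q 0 + (l.countP (fun it => it.2 == "#" && decide (q ∈ pvNbrs it.1)) : Int) := by
  induction l generalizing d with
  | nil => simp
  | cons it l ih =>
    by_cases h : it.2 = "#"
    · rw [List.foldl_cons, if_neg (by simp [h]), ih,
        PySem.Dict.getD_foldl_insert_add_one, List.countP_cons]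
      by_cases hq : q ∈ pvNbrs it.1
      · rw [List.count_eq_one_of_mem (pvNbrs_nodup it.1) hq]
        simp [h, hq]; ring
      · rw [List.count_eq_zero.mpr hq]
        simp [h, hq]
    · rw [List.foldl_cons, if_pos h, ih, List.countP_cons]
      simp [h]

-- one key: with distinct keys, scaffold items with key n are counted by the lookup
lemma countP_key (l : List ((Int × Int) × String)) (h : (l.map Prod.fst).Nodup) (n : Int × Int) :
    l.countP (fun it => it.1 == n && it.2 == "#")
    = (if (PySem.Dict.mk l).get? n == some "#" then 1 else 0) := by
  induction l with
  | nil => simp [PySem.Dict.get?]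
  | cons it l ih =>
    obtain ⟨k, v⟩ := it
    rw [List.countP_cons, PySem.Dict.get?_mk_cons]
    simp only [List.map_cons, List.nodup_cons] at h
    by_cases hk : k = n
    · subst hk
      have h0 : l.countP (fun it => it.1 == k && it.2 == "#") = 0 := by
        rw [List.countP_eq_zero]
        intro a ha
        simp only [Bool.and_eq_true, beq_iff_eq]
        rintro ⟨h1, -⟩; exact h.1 (h1 ▸ List.mem_map_of_mem ha)
      by_cases hv : v = "#" <;> simp [h0, hv]
    · rw [ih h.2]
      simp [hk]

-- key set: with distinct keys, scaffold items with key in S are counted by lookups over S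
lemma countP_keyset (l : List ((Int × Int) × String)) (h : (l.map Prod.fst).Nodup)
    (S : List (Int × Int)) (hS : S.Nodup) :
    l.countP (fun it => it.2 == "#" && decide (it.1 ∈ S))
    = S.countP (fun n => (PySem.Dict.mk l).get? n == some "#") := by
  induction S with
  | nil => simp
  | cons n S ih =>
    simp only [List.nodup_cons] at hS
    rw [List.countP_cons]
    have split : l.countP (fun it => it.2 == "#" && decide (it.1 ∈ n :: S))
        = l.countP (fun it => it.1 == n && it.2 == "#")
          + l.countP (fun it => it.2 == "#" && decide (it.1 ∈ S)) := by
      clear h ih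
      induction l with
      | nil => simp
      | cons a as ihl =>
        rw [List.countP_cons, List.countP_cons, List.countP_cons, ihl]
        by_cases h1 : a.1 = n
        · by_cases h3 : a.1 ∈ S
          · exact absurd (h1 ▸ h3) hS.1
          · by_cases h2 : a.2 = "#" <;> simp [h1, h2, hS.1] <;> omega
        · by_cases h2 : a.2 = "#" <;> by_cases h3 : a.1 ∈ S <;> simp [h1, h2, h3] <;> omega
    rw [split, countP_key l h n, ih hS.2]
    omega

-- ===== VERDICT (by name: the statement is the Claim_ definition above) =====
-- the two step functions agree, given the degree-table characterization
theorem alignment_parameters_spec : Claim_equal_alignment_parameters := by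
  intro grid _
  show alignment_parameters grid = alignment_parameters_alt grid
  unfold alignment_parameters alignment_parameters_alt
  have hnd : ((pvGrid grid).items.map Prod.fst).Nodup := by
    simpa [PySem.Dict.keys] using PySem.Dict.nodup_keys_ofList (grid.map (fun e => ((e.1, e.2.1), e.2.2)))
  have hcounts : ∀ q : Int × Int,
      ((pvGrid grid).items.foldl (fun d it =>
        if it.2 ≠ "#" then d
        else (pvNbrs it.1).foldl (fun d q => d.insert q (d.getD q 0 + 1)) d)
        (PySem.Dict.empty : PySem.Dict (Int × Int) Int)).getD q 0
      = ((pvNbrs q).countP (fun n => (pvGrid grid).get? n == some "#") : Int) := by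
    intro q
    rw [scatter_getD]
    have hpred : (fun (it : (Int × Int) × String) => it.2 == "#" && decide (q ∈ pvNbrs it.1))
        = (fun it => it.2 == "#" && decide (it.1 ∈ pvNbrs q)) := by
      funext it
      simp [pvNbrs_mem_comm]
    rw [hpred]
    rw [countP_keyset (pvGrid grid).items hnd (pvNbrs q) (pvNbrs_nodup q)]
    rw [PySem.Dict.getD_empty, zero_add]
  have hfun : (fun (total : Int) (it : (Int × Int) × String) =>
      if it.2 ≠ "#" then total
      else
        let neighbors := [(pvGrid grid).get? (it.1.1 + 1, it.1.2), (pvGrid grid).get? (it.1.1 - 1, it.1.2),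
                          (pvGrid grid).get? (it.1.1, it.1.2 + 1), (pvGrid grid).get? (it.1.1, it.1.2 - 1)]
        if neighbors.all (fun n => n == some "#") then total + it.1.1 * it.1.2 else total)
      = (fun total it =>
        if it.2 == "#" && (((pvGrid grid).items.foldl (fun d it =>
            if it.2 ≠ "#" then d
            else (pvNbrs it.1).foldl (fun d q => d.insert q (d.getD q 0 + 1)) d)
            (PySem.Dict.empty : PySem.Dict (Int × Int) Int)).getD it.1 0) == 4
          then total + it.1.1 * it.1.2 else total) := by
    funext total it
    rw [hcounts it.1]
    by_cases hc : it.2 = "#"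
    · by_cases h1 : ((pvGrid grid).get? (it.1.1 + 1, it.1.2) == some "#") = true <;>
      by_cases h2 : ((pvGrid grid).get? (it.1.1 - 1, it.1.2) == some "#") = true <;>
      by_cases h3 : ((pvGrid grid).get? (it.1.1, it.1.2 + 1) == some "#") = true <;>
      by_cases h4 : ((pvGrid grid).get? (it.1.1, it.1.2 - 1) == some "#") = true <;>
        simp [hc, h1, h2, h3, h4, pvNbrs]
    · simp [hc]
  exact congrArg (fun f => List.foldl f (0 : Int) (pvGrid grid).items) hfun
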